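-- pv_equiv track=rewrite | github.com/hell-of-sloth/hell-of-sloth-PS | junyoung/나태지옥 4-2/최대상금 삼성.py | change_position
-- ===== SOURCE A (Python) =====
-- from collections import deque
--
-- def change_position(coins, change):
--     max_coin = 0
--
--     q = deque()
--     duple = set()
--     q.append((coins, change))
--
--     while q:
--         coin, cnt = q.popleft()
--
--         if cnt == 4:
--             pass
--
--         if cnt == 0:
--             max_coin = max(max_coin, int(''.join(coin)))
--             continue
--
--         for i in range(len(coin)-1):
--             for j in range(i+1, len(coin)):
--                 temp = coin[:]
--                 temp[i], temp[j] = temp[j], temp[i]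
--                 temp_set = (int(''.join(temp)), cnt-1)
--                 if temp_set not in duple:
--                     duple.add(temp_set)
--                     q.append((temp, cnt-1))
--
--     return max_coin
-- ===== SOURCE B (Python) =====
-- def change_position(coins, change):
--     # Level-synchronised frontier search: keep one representative state per
--     # distinct numeric value at each depth; detect a period-2 repetition of
--     # the level and jump to the final depth by parity instead of iterating
--     # `change` times.
--     def next_level(states):
--         seen = set()
--         nxt = []
--         for c in states:
--             for i in range(len(c) - 1):
--                 for j in range(i + 1, len(c)):
--                     t = c[:]
--                     t[i], t[j] = t[j], t[i]
--                     v = int(''.join(t))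
--                     if v not in seen:
--                         seen.add(v)
--                         nxt.append(t)
--         return nxt
--
--     if change == 0:
--         return int(''.join(coins))
--     cur = [list(coins)]
--     prev = None
--     k = 0
--     while k < change:
--         nxt = next_level(cur)
--         k += 1
--         if nxt == prev:
--             cur = nxt if (change - k) % 2 == 0 else cur
--             break
--         prev, cur = cur, nxt
--     return max((int(''.join(c)) for c in cur), default=0)
-- ===== Notes on version B (the rewrite author's own statement) =====
-- stated objective: faster
-- what changed: Replaces A's FIFO-queue BFS with a global (value,count)-keyed visited set and a running max by a level-by-level frontier iteration (one representative state per numeric value per level) that detects the period-2 repetition of levels and jumps to the final depth by parity, then takes a single max over the last level.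
-- outside the precondition, e.g. on change_position(['-5'], 0): A returns 0, B returns -5; on change_position([' ', '5'], 1): A returns 5, B returns 5
import Mathlib
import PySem

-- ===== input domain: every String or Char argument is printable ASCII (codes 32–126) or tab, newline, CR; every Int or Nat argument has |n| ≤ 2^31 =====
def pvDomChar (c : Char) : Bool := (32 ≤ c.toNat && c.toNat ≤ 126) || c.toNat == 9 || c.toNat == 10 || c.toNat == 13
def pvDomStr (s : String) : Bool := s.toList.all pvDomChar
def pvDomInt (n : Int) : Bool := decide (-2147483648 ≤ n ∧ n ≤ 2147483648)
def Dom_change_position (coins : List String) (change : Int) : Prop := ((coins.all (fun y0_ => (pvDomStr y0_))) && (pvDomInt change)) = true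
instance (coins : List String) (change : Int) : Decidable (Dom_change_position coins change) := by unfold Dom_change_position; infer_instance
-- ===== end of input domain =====

-- B replaces A's FIFO-queue search (global visited set keyed by (value, count)) with a
-- level-by-level frontier iteration that stops early on a period-2 repetition of the level.

-- ===== PORT A =====
-- int(''.join(c))  (none = ValueError, which only happens outside Pre_)
def pvVal (c : List String) : Option Int := PySem.Int.ofStr? (PySem.Str.join "" c)

-- temp = coin[:]; temp[i], temp[j] = temp[j], temp[i]
-- (i, j always index in range here, so getD/set are exact)
def pvSwap (c : List String) (i j : Nat) : List String :=
  (c.set i (c.getD j "")).set j (c.getD i "")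

-- the index pairs visited by 'for i in range(len-1): for j in range(i+1, len)'
def pvPairs (n : Nat) : List (Nat × Nat) :=
  (List.range (n - 1)).flatMap (fun i => (List.range' (i + 1) (n - (i + 1))).map (fun j => (i, j)))

-- body of A's inner double loop: try one swap, dedup on (int(''.join(temp)), cnt-1),
-- append the new state to the queue
def pvExpandStep (coin : List String) (cnt : Int)
    (qd : List (List String × Int) × PySem.Set (Int × Int)) (ij : Nat × Nat) :
    List (List String × Int) × PySem.Set (Int × Int) :=
  let temp := pvSwap coin ij.1 ij.2
  match pvVal temp with
  | none => qd  -- Python raises ValueError here; outside Pre_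
  | some v =>
    if PySem.Set.contains qd.2 (v, cnt - 1) then qd
    else (qd.1 ++ [(temp, cnt - 1)], PySem.Set.add qd.2 (v, cnt - 1))

-- the 'while q:' loop of A; fuel only makes the recursion structural (it never
-- runs out on inputs satisfying Pre_; 'if cnt == 4: pass' of the source is a no-op)
def pvBfsA : Nat → List (List String × Int) → PySem.Set (Int × Int) → Int → Int
  | 0, _, _, m => m
  | _ + 1, [], _, m => m
  | fuel + 1, (coin, cnt) :: rest, duple, m =>
    if cnt = 0 then
      pvBfsA fuel rest duple
        (match pvVal coin with
         | some v => max m v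
         | none => m)  -- Python raises ValueError here; outside Pre_
    else
      let qd := (pvPairs coin.length).foldl (pvExpandStep coin cnt) (rest, duple)
      pvBfsA fuel qd.1 qd.2 m

def change_position (coins : List String) (change : Int) : Int :=
  pvBfsA ((coins.length * coins.length + 1) ^ change.toNat) [(coins, change)] PySem.Set.empty 0

-- ===== PORT B =====
-- body of B's inner double loop: record one representative state per distinct value
def pvSeenStep (c : List String) (sn : PySem.Set Int × List (List String)) (ij : Nat × Nat) :
    PySem.Set Int × List (List String) :=
  let t := pvSwap c ij.1 ij.2
  match pvVal t with
  | none => sn  -- Python raises ValueError here; outside Pre_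
  | some v =>
    if PySem.Set.contains sn.1 v then sn
    else (PySem.Set.add sn.1 v, sn.2 ++ [t])

def pvLevelStep (sn : PySem.Set Int × List (List String)) (c : List String) :
    PySem.Set Int × List (List String) :=
  (pvPairs c.length).foldl (pvSeenStep c) sn

-- B's next_level
def pvNextLevel (states : List (List String)) : List (List String) :=
  (states.foldl pvLevelStep (PySem.Set.empty, [])).2

-- B's while loop: r = change - k (swaps still to do); stop early on a period-2 repeat
def pvLoopB : Nat → List (List String) → Option (List (List String)) → List (List String)
  | 0, cur, _ => cur
  | r + 1, cur, prev =>
    let nxt := pvNextLevel cur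
    if prev = some nxt then (if r % 2 = 0 then nxt else cur)
    else pvLoopB r nxt (some cur)

def change_position_alt (coins : List String) (change : Int) : Int :=
  if change = 0 then (pvVal coins).getD 0  -- Python raises on an unparseable join; outside Pre_
  else
    (PySem.List.max? ((pvLoopB change.toNat [coins] none).filterMap pvVal) (fun v => v)).getD 0

-- ===== PRECONDITION & SPEC =====
-- Pre_ admits nonnegative `change` (A never terminates on a negative one) and requires
-- the coins to be digit strings, at least one nonempty — the natural domain, on which
-- every int() A performs succeeds — except that lists of length ≤ 1, whose strings A
-- never parses when change > 0, are admitted with arbitrary strings.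
-- Pre_ excludes inputs A still returns on: non-digit yet int-parseable coins (e.g.
-- (['-5'], 0)), where A's result is floored at 0 by its 0-initialised running max and
-- the per-level dedup by int value may conflate distinct states.
def Pre_change_position (coins : List String) (change : Int) : Prop :=
  0 ≤ change ∧
    ((0 < change ∧ coins.length ≤ 1) ∨
      ((coins.all (fun s => s.toList.all PySem.Chars.isdigit)) = true ∧
        (coins.any (fun s => !(s == ""))) = true))
instance (coins : List String) (change : Int) : Decidable (Pre_change_position coins change) := by
  unfold Pre_change_position; infer_instance

def pvWitness_change_position : List String × Int := (["1", "2", "0"], 2)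

def Spec_change_position (coins : List String) (change : Int) (out : Int) : Prop := out = change_position_alt coins change
instance (coins : List String) (change : Int) (out : Int) : Decidable (Spec_change_position coins change out) := by unfold Spec_change_position; infer_instance

-- ===== CLAIM (what is proved, stated in full; the proofs are below) =====
def Claim_equal_change_position : Prop := ∀ (coins : List String) (change : Int), Dom_change_position coins change → Pre_change_position coins change → Spec_change_position coins change (change_position coins change)

-- ===== LEMMAS AND PROOFS =====

-- the running max A performs on the states it pops with cnt == 0
def pvStep (m : Int) (s : List String) : Int :=
  match pvVal s with
  | some v => max m v
  | none => m

-- exact number of queue pops A performs: one per state of each level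
def pvT : Nat → List (List String) → Nat
  | 0, s => s.length
  | K + 1, s => s.length + pvT K (pvNextLevel s)

theorem pv_bind_some {α β : Type} (o : Option α) (f : α → Option β) (b : β)
    (h : (o >>= f) = some b) : ∃ a, o = some a ∧ f a = some b := by
  cases o with
  | none => exact absurd h (by simp)
  | some a => exact ⟨a, rfl, h⟩

theorem pv_ofChars_nonneg (cs : List Char) (h : '-' ∉ cs) (v : Int)
    (hv : PySem.Int.ofChars? cs = some v) : 0 ≤ v := by
  unfold PySem.Int.ofChars? at hv
  simp only [] at hv
  have hsub : ∀ x, x ∈ (List.dropWhile PySem.Int.isIntSpace (List.dropWhile PySem.Int.isIntSpace cs).reverse).reverse → x ∈ cs := by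
    intro x hx
    rw [List.mem_reverse] at hx
    have := (List.dropWhile_sublist _ (l := (List.dropWhile PySem.Int.isIntSpace cs).reverse)).mem hx
    rw [List.mem_reverse] at this
    exact (List.dropWhile_sublist _ (l := cs)).mem this
  revert hv
  generalize hgen : (List.dropWhile PySem.Int.isIntSpace (List.dropWhile PySem.Int.isIntSpace cs).reverse).reverse = cs' at hsub ⊢
  split
  · exact fun hv => absurd (hsub '-' List.mem_cons_self) h
  · intro hv
    simp only [Option.map_eq_some_iff] at hv
    obtain ⟨n, hn, rfl⟩ := hv
    obtain ⟨a, -, ha⟩ := pv_bind_some _ _ _ hn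
    simp only [Option.pure_def, Option.some.injEq] at ha
    subst ha
    exact Int.natCast_nonneg a
  · intro hv
    simp only [Option.map_eq_some_iff] at hv
    obtain ⟨n, hn, rfl⟩ := hv
    obtain ⟨a, -, ha⟩ := pv_bind_some _ _ _ hn
    simp only [Option.pure_def, Option.some.injEq] at ha
    subst ha
    exact Int.natCast_nonneg a

theorem pvBfsA_nil (f : Nat) (d : PySem.Set (Int × Int)) (m : Int) :
    pvBfsA f [] d m = m := by
  cases f <;> rfl

-- (L1) popping a block of cnt == 0 states folds the running max over them
theorem pvBfsA_zero_block (states : List (List String)) :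
    ∀ (f : Nat) (d : PySem.Set (Int × Int)) (m : Int),
    pvBfsA (f + states.length) (states.map (fun s => (s, (0 : Int)))) d m =
      states.foldl pvStep m := by
  induction states with
  | nil => intro f d m; simpa using pvBfsA_nil f d m
  | cons s rest ih =>
    intro f d m
    have harr : f + (s :: rest).length = (f + rest.length) + 1 := by
      simp [List.length_cons]; omega
    rw [harr]
    simp only [List.map_cons, pvBfsA, List.foldl_cons]
    exact ih (f) d (pvStep m s)

-- (L2a) one state's expansion: A's fold on (queue, duple) mirrors B's fold on (seen, next)
theorem pv_pairsFold_rel (ps : List (Nat × Nat)) (coin : List String) (c : Int) :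
    ∀ (S₂ : List (List String × Int)) (P : List (List String)) (seen : PySem.Set Int)
      (d : PySem.Set (Int × Int)),
    (∀ v : Int, (v, c - 1) ∈ d ↔ v ∈ seen) →
    (∀ (v t : Int), (v, t) ∈ d → c - 1 ≤ t) →
    (ps.foldl (pvExpandStep coin c) (S₂ ++ P.map (fun s => (s, c - 1)), d)).1 =
        S₂ ++ ((ps.foldl (pvSeenStep coin) (seen, P)).2.map (fun s => (s, c - 1))) ∧
      (∀ v : Int, (v, c - 1) ∈ (ps.foldl (pvExpandStep coin c) (S₂ ++ P.map (fun s => (s, c - 1)), d)).2 ↔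
          v ∈ (ps.foldl (pvSeenStep coin) (seen, P)).1) ∧
      (∀ (v t : Int), (v, t) ∈ (ps.foldl (pvExpandStep coin c) (S₂ ++ P.map (fun s => (s, c - 1)), d)).2 → c - 1 ≤ t) := by
  induction ps with
  | nil => intro S₂ P seen d H1 H2; exact ⟨rfl, H1, H2⟩
  | cons ij ps ih =>
    intro S₂ P seen d H1 H2
    simp only [List.foldl_cons]
    cases hval : pvVal (pvSwap coin ij.1 ij.2) with
    | none =>
      have hA : pvExpandStep coin c (S₂ ++ P.map (fun s => (s, c - 1)), d) ij =
          (S₂ ++ P.map (fun s => (s, c - 1)), d) := by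
        simp [pvExpandStep, hval]
      have hB : pvSeenStep coin (seen, P) ij = (seen, P) := by
        simp [pvSeenStep, hval]
      rw [hA, hB]
      exact ih S₂ P seen d H1 H2
    | some v =>
      by_cases hv : v ∈ seen
      · have hA : pvExpandStep coin c (S₂ ++ P.map (fun s => (s, c - 1)), d) ij =
            (S₂ ++ P.map (fun s => (s, c - 1)), d) := by
          simp [pvExpandStep, hval, (H1 v).mpr hv]
        have hB : pvSeenStep coin (seen, P) ij = (seen, P) := by
          simp [pvSeenStep, hval, hv]
        rw [hA, hB]
        exact ih S₂ P seen d H1 H2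
      · have hnd : (v, c - 1) ∉ d := fun hc => hv ((H1 v).mp hc)
        have hA : pvExpandStep coin c (S₂ ++ P.map (fun s => (s, c - 1)), d) ij =
            (S₂ ++ (P ++ [pvSwap coin ij.1 ij.2]).map (fun s => (s, c - 1)),
              PySem.Set.add d (v, c - 1)) := by
          simp [pvExpandStep, hval, hnd, List.append_assoc]
        have hB : pvSeenStep coin (seen, P) ij =
            (PySem.Set.add seen v, P ++ [pvSwap coin ij.1 ij.2]) := by
          simp [pvSeenStep, hval, hv]
        rw [hA, hB]
        refine ih S₂ (P ++ [pvSwap coin ij.1 ij.2]) (PySem.Set.add seen v) (PySem.Set.add d (v, c - 1)) ?_ ?_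
        · intro w
          rw [PySem.Set.mem_add, PySem.Set.mem_add]
          constructor
          · rintro (hw | hw)
            · exact Or.inl ((H1 w).mp hw)
            · exact Or.inr (congrArg Prod.fst hw)
          · rintro (hw | hw)
            · exact Or.inl ((H1 w).mpr hw)
            · exact Or.inr (by rw [hw])
        · intro w t hw
          rw [PySem.Set.mem_add] at hw
          rcases hw with hw | hw
          · exact H2 w t hw
          · injection hw with h1 h2; omega

-- (L2) processing one whole level: A pops the level's states, building the next level
theorem pv_level (c : Int) (hc : c ≠ 0) (S₂ : List (List String)) :
    ∀ (P : List (List String)) (seen : PySem.Set Int) (d : PySem.Set (Int × Int))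
      (f : Nat) (m : Int),
    (∀ v : Int, (v, c - 1) ∈ d ↔ v ∈ seen) →
    (∀ (v t : Int), (v, t) ∈ d → c - 1 ≤ t) →
    ∃ d' : PySem.Set (Int × Int),
      pvBfsA (f + S₂.length) (S₂.map (fun s => (s, c)) ++ P.map (fun s => (s, c - 1))) d m
          = pvBfsA f ((S₂.foldl pvLevelStep (seen, P)).2.map (fun s => (s, c - 1))) d' m
        ∧ (∀ (v t : Int), (v, t) ∈ d' → c - 1 ≤ t) := by
  induction S₂ with
  | nil => intro P seen d f m H1 H2; exact ⟨d, rfl, H2⟩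
  | cons s S₂ ih =>
    intro P seen d f m H1 H2
    obtain ⟨hq, hH1, hH2⟩ := pv_pairsFold_rel (pvPairs s.length) s c
      (S₂.map (fun s => (s, c))) P seen d H1 H2
    have harr : f + (s :: S₂).length = (f + S₂.length) + 1 := by
      simp [List.length_cons]; omega
    rw [harr]
    simp only [List.map_cons, List.cons_append, pvBfsA, if_neg hc]
    rw [hq]
    have := ih (pvLevelStep (seen, P) s).2 (pvLevelStep (seen, P) s).1 _ f m hH1 hH2
    simpa [pvLevelStep, List.foldl_cons] using this

-- (L3) the whole BFS is the level iteration: pvT counts the pops exactly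
theorem pv_top (K : Nat) :
    ∀ (s : List (List String)) (d : PySem.Set (Int × Int)) (f : Nat) (m : Int),
    (∀ (v t : Int), (v, t) ∈ d → (K : Int) ≤ t) →
    pvBfsA (f + pvT K s) (s.map (fun st => (st, (K : Int)))) d m =
      (pvNextLevel^[K] s).foldl pvStep m := by
  induction K with
  | zero =>
    intro s d f m hd
    simpa [pvT] using pvBfsA_zero_block s f d m
  | succ K ih =>
    intro s d f m hd
    have hc : ((K : Int) + 1) ≠ 0 := by omega
    have H1 : ∀ v : Int, (v, ((K : Int) + 1) - 1) ∈ d ↔ v ∈ (PySem.Set.empty : PySem.Set Int) := by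
      intro v
      constructor
      · intro hv
        have := hd v _ hv
        omega
      · intro hv
        simp [PySem.Set.empty] at hv
    have H2 : ∀ (v t : Int), (v, t) ∈ d → ((K : Int) + 1) - 1 ≤ t := by
      intro v t hv
      have := hd v t hv
      omega
    obtain ⟨d', heq, hd'⟩ := pv_level ((K : Int) + 1) hc s [] PySem.Set.empty d
      (f + pvT K (pvNextLevel s)) m H1 H2
    have hfuel : (f + pvT K (pvNextLevel s)) + s.length = f + pvT (K + 1) s := by
      simp [pvT]; omega
    have hcast : ((K + 1 : Nat) : Int) = (K : Int) + 1 := by push_cast; ring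
    rw [hcast]
    simp only [List.map_nil, List.append_nil] at heq
    rw [← hfuel] at *
    rw [heq]
    have hd'' : ∀ (v t : Int), (v, t) ∈ d' → (K : Int) ≤ t := by
      intro v t hv
      have := hd' v t hv
      omega
    have hnext : (s.foldl pvLevelStep (PySem.Set.empty, [])).2 = pvNextLevel s := rfl
    rw [hnext]
    rw [show ((K : Int) + 1 - 1) = (K : Int) from by ring]
    rw [ih (pvNextLevel s) d' f m hd'']
    rw [Function.iterate_succ_apply]

theorem pv_mem_pvPairs (n : Nat) (ij : Nat × Nat) (h : ij ∈ pvPairs n) :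
    ij.1 < n ∧ ij.2 < n := by
  simp only [pvPairs, List.mem_flatMap, List.mem_range, List.mem_map, List.mem_range'] at h
  obtain ⟨i, hi, j, hj, rfl⟩ := h
  simp only []
  omega

theorem pv_length_pvSwap (c : List String) (i j : Nat) :
    (pvSwap c i j).length = c.length := by
  simp [pvSwap]

theorem pv_mem_pvSwap (c : List String) (i j : Nat) (hi : i < c.length) (hj : j < c.length)
    (x : String) (hx : x ∈ pvSwap c i j) : x ∈ c := by
  unfold pvSwap at hx
  rcases List.mem_or_eq_of_mem_set hx with hx | rfl
  · rcases List.mem_or_eq_of_mem_set hx with hx | rfl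
    · exact hx
    · rw [List.getD_eq_getElem c _ hj]
      exact List.getElem_mem hj
  · rw [List.getD_eq_getElem c _ hi]
    exact List.getElem_mem hi

theorem pv_inner_sound (coin : List String) (ps : List (Nat × Nat)) :
    ∀ (sn : PySem.Set Int × List (List String)) (x : List String),
    x ∈ (ps.foldl (pvSeenStep coin) sn).2 →
      x ∈ sn.2 ∨ ∃ ij ∈ ps, x = pvSwap coin ij.1 ij.2 := by
  induction ps with
  | nil => intro sn x hx; exact Or.inl hx
  | cons ij ps ih =>
    intro sn x hx
    rw [List.foldl_cons] at hx
    rcases ih (pvSeenStep coin sn ij) x hx with hx' | ⟨ij', hij', rfl⟩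
    · unfold pvSeenStep at hx'
      simp only [] at hx'
      cases hval : pvVal (pvSwap coin ij.1 ij.2) with
      | none => rw [hval] at hx'; exact Or.inl hx'
      | some v =>
        rw [hval] at hx'
        simp only [] at hx'
        by_cases hc : PySem.Set.contains sn.1 v
        · rw [if_pos hc] at hx'; exact Or.inl hx'
        · rw [if_neg hc] at hx'
          simp only [List.mem_append, List.mem_singleton] at hx'
          rcases hx' with hx' | rfl
          · exact Or.inl hx'
          · exact Or.inr ⟨ij, List.mem_cons_self, rfl⟩
    · exact Or.inr ⟨ij', List.mem_cons_of_mem _ hij', rfl⟩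

theorem pv_inner_len (coin : List String) (ps : List (Nat × Nat)) :
    ∀ (sn : PySem.Set Int × List (List String)),
    (ps.foldl (pvSeenStep coin) sn).2.length ≤ sn.2.length + ps.length := by
  induction ps with
  | nil => intro sn; simp
  | cons ij ps ih =>
    intro sn
    rw [List.foldl_cons]
    refine le_trans (ih (pvSeenStep coin sn ij)) ?_
    have : (pvSeenStep coin sn ij).2.length ≤ sn.2.length + 1 := by
      unfold pvSeenStep
      simp only []
      cases hval : pvVal (pvSwap coin ij.1 ij.2) with
      | none => simp
      | some v =>
        simp only []
        by_cases hc : PySem.Set.contains sn.1 v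
        · rw [if_pos hc]; omega
        · rw [if_neg hc]; simp
    simp only [List.length_cons]
    omega

theorem pv_outer_sound (S : List (List String)) :
    ∀ (sn : PySem.Set Int × List (List String)) (x : List String),
    x ∈ (S.foldl pvLevelStep sn).2 →
      x ∈ sn.2 ∨ ∃ c ∈ S, ∃ ij ∈ pvPairs c.length, x = pvSwap c ij.1 ij.2 := by
  induction S with
  | nil => intro sn x hx; exact Or.inl hx
  | cons c S ih =>
    intro sn x hx
    rw [List.foldl_cons] at hx
    rcases ih (pvLevelStep sn c) x hx with hx' | ⟨c', hc', hrest⟩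
    · rcases pv_inner_sound c (pvPairs c.length) sn x hx' with hx'' | ⟨ij, hij, rfl⟩
      · exact Or.inl hx''
      · exact Or.inr ⟨c, List.mem_cons_self, ij, hij, rfl⟩
    · exact Or.inr ⟨c', List.mem_cons_of_mem _ hc', hrest⟩

theorem pv_pvPairs_len (n : Nat) : (pvPairs n).length ≤ n * n := by
  have h1 : (pvPairs n).length = ((List.range (n - 1)).map
      (fun i => ((List.range' (i + 1) (n - (i + 1))).map (fun j => (i, j))).length)).sum := by
    simp [pvPairs, List.length_flatMap]
  rw [h1]
  have h2 : ∀ x ∈ (List.range (n - 1)).map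
      (fun i => ((List.range' (i + 1) (n - (i + 1))).map (fun j => (i, j))).length), x ≤ n := by
    intro x hx
    simp only [List.mem_map, List.mem_range] at hx
    obtain ⟨i, hi, rfl⟩ := hx
    simp only [List.length_map, List.length_range']
    omega
  refine le_trans (List.sum_le_card_nsmul _ n h2) ?_
  simp only [List.length_map, List.length_range, smul_eq_mul]
  exact Nat.mul_le_mul (Nat.sub_le n 1) le_rfl

theorem pv_nextLevel_len (s : List (List String)) (n : Nat) (hn : ∀ c ∈ s, c.length = n) :
    (pvNextLevel s).length ≤ s.length * (n * n) := by
  unfold pvNextLevel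
  have : ∀ (S : List (List String)), (∀ c ∈ S, c.length = n) →
      ∀ (sn : PySem.Set Int × List (List String)),
      (S.foldl pvLevelStep sn).2.length ≤ sn.2.length + S.length * (n * n) := by
    intro S
    induction S with
    | nil => intro _ sn; simp
    | cons c S ih =>
      intro hS sn
      rw [List.foldl_cons]
      refine le_trans (ih (fun c' hc' => hS c' (List.mem_cons_of_mem _ hc')) (pvLevelStep sn c)) ?_
      have hlen : (pvLevelStep sn c).2.length ≤ sn.2.length + n * n := by
        unfold pvLevelStep
        refine le_trans (pv_inner_len c (pvPairs c.length) sn) ?_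
        refine Nat.add_le_add_left ?_ _
        rw [← hS c List.mem_cons_self]
        exact pv_pvPairs_len c.length
      simp only [List.length_cons]
      have : S.length * (n * n) + (sn.2.length + n * n) = sn.2.length + (S.length + 1) * (n * n) := by ring
      omega
  simpa using this s hn (PySem.Set.empty, [])

theorem pv_nextLevel_lengths (s : List (List String)) (n : Nat) (hn : ∀ c ∈ s, c.length = n)
    (x : List String) (hx : x ∈ pvNextLevel s) : x.length = n := by
  rcases pv_outer_sound s (PySem.Set.empty, []) x hx with hx' | ⟨c, hc, ij, hij, rfl⟩
  · simp at hx'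
  · rw [pv_length_pvSwap]
    exact hn c hc

theorem pv_pvT_bound (n : Nat) : ∀ (K : Nat) (s : List (List String)),
    (∀ c ∈ s, c.length = n) → pvT K s ≤ s.length * (n * n + 1) ^ K := by
  intro K
  induction K with
  | zero => intro s _; simp [pvT]
  | succ K ih =>
    intro s hs
    have hF : pvT K (pvNextLevel s) ≤ (pvNextLevel s).length * (n * n + 1) ^ K :=
      ih (pvNextLevel s) (fun c hc => pv_nextLevel_lengths s n hs c hc)
    have hlen := pv_nextLevel_len s n hs
    have hone : 1 ≤ (n * n + 1) ^ K := Nat.one_le_pow _ _ (by omega)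
    have : pvT (K + 1) s = s.length + pvT K (pvNextLevel s) := rfl
    rw [this, pow_succ]
    have h2 : (pvNextLevel s).length * (n * n + 1) ^ K ≤ s.length * (n * n) * (n * n + 1) ^ K :=
      Nat.mul_le_mul_right _ hlen
    nlinarith [hone, hF, h2]

-- ----- B side: the loop with its period-2 skip computes the K-fold iteration -----
theorem pv_iterate_period {α : Type} (g : α → α) (x : α) (h : g (g x) = x) (k : Nat) :
    g^[k] x = if k % 2 = 0 then x else g x := by
  induction k with
  | zero => simp
  | succ k ih =>
    rw [Function.iterate_succ_apply', ih]
    by_cases hk : k % 2 = 0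
    · rw [if_pos hk, if_neg (by omega)]
    · rw [if_neg hk, if_pos (by omega), h]

theorem pv_loopB_eq (r : Nat) : ∀ (c p : List (List String)), pvNextLevel p = c →
    pvLoopB r c (some p) = pvNextLevel^[r] c := by
  induction r with
  | zero => intro c p _; rfl
  | succ r ih =>
    intro c p hp
    show (let nxt := pvNextLevel c;
      if some p = some nxt then (if r % 2 = 0 then nxt else c)
      else pvLoopB r nxt (some c)) = pvNextLevel^[r + 1] c
    simp only []
    by_cases hcase : p = pvNextLevel c
    · rw [if_pos (by rw [hcase])]
      have hFF : pvNextLevel (pvNextLevel c) = c := by rw [← hcase]; exact hp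
      rw [pv_iterate_period (pvNextLevel) c hFF (r + 1)]
      by_cases hr : r % 2 = 0
      · rw [if_pos hr, if_neg (by omega)]
      · rw [if_neg hr, if_pos (by omega)]
    · rw [if_neg (by simpa using hcase)]
      rw [ih (pvNextLevel c) c rfl, ← Function.iterate_succ_apply]

theorem pv_alt_eq (coins : List String) (change : Int) (h0 : change ≠ 0) (hch : 0 ≤ change) :
    change_position_alt coins change =
      (PySem.List.max? ((pvNextLevel^[change.toNat] [coins]).filterMap pvVal)
        (fun v => v)).getD 0 := by
  unfold change_position_alt
  rw [if_neg h0]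
  have hK : change.toNat ≠ 0 := by omega
  obtain ⟨r, hr⟩ : ∃ r, change.toNat = r + 1 := ⟨change.toNat - 1, by omega⟩
  rw [hr]
  have hstep : pvLoopB (r + 1) [coins] none = pvLoopB r (pvNextLevel [coins]) (some [coins]) := by
    show (let nxt := pvNextLevel [coins];
      if (none : Option (List (List String))) = some nxt then (if r % 2 = 0 then nxt else [coins])
      else pvLoopB r nxt (some [coins])) = _
    simp only []
    rw [if_neg (by simp)]
  rw [hstep, pv_loopB_eq r (pvNextLevel [coins]) [coins] rfl, ← Function.iterate_succ_apply]

-- ----- the final max -----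
theorem pv_foldl_pvStep (states : List (List String)) : ∀ (m : Int),
    states.foldl pvStep m = (states.filterMap pvVal).foldl max m := by
  induction states with
  | nil => intro m; rfl
  | cons s rest ih =>
    intro m
    cases hval : pvVal s with
    | none => simp [pvStep, hval, ih]
    | some v => simp [pvStep, hval, ih]

theorem pv_final_max (vs : List Int) (h : ∀ v ∈ vs, 0 ≤ v) :
    vs.foldl max 0 = (PySem.List.max? vs (fun v => v)).getD 0 := by
  cases vs with
  | nil => rfl
  | cons x t =>
    rw [PySem.List.max?_id_cons]
    simp only [Option.getD_some, List.foldl_cons]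
    rw [max_eq_right (h x List.mem_cons_self)]

-- ----- values of digit states are nonnegative -----
theorem pv_mem_join_nil (parts : List (List Char)) :
    ∀ x ∈ PySem.Chars.join [] parts, ∃ p ∈ parts, x ∈ p := by
  induction parts with
  | nil =>
    intro x hx
    rw [PySem.Chars.join_nil] at hx
    exact absurd hx (List.not_mem_nil)
  | cons a rest ih =>
    intro x hx
    cases rest with
    | nil =>
      rw [PySem.Chars.join_singleton] at hx
      exact ⟨a, List.mem_cons_self, hx⟩
    | cons b r =>
      rw [PySem.Chars.join_cons_cons] at hx
      simp only [List.append_nil, List.mem_append] at hx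
      rcases hx with hx | hx
      · exact ⟨a, List.mem_cons_self, hx⟩
      · obtain ⟨p, hp, hxp⟩ := ih x hx
        exact ⟨p, List.mem_cons_of_mem _ hp, hxp⟩

theorem pv_val_nonneg (st : List String)
    (hd : ∀ p ∈ st, (p.toList.all PySem.Chars.isdigit) = true) (v : Int)
    (hv : pvVal st = some v) : 0 ≤ v := by
  unfold pvVal PySem.Int.ofStr? at hv
  rw [PySem.Str.toList_join] at hv
  have hsep : ("" : String).toList = [] := rfl
  rw [hsep] at hv
  refine pv_ofChars_nonneg _ ?_ v hv
  intro hmem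
  obtain ⟨p, hp, hxp⟩ := pv_mem_join_nil _ _ hmem
  rw [List.mem_map] at hp
  obtain ⟨q, hq, rfl⟩ := hp
  have := hd q hq
  rw [List.all_eq_true] at this
  have hdig := this _ hxp
  exact absurd hdig (by decide)

-- ----- every state of every level is built from pieces of `coins` -----
theorem pv_iter_pieces (coins : List String) (K : Nat) :
    ∀ st ∈ pvNextLevel^[K] [coins], ∀ p ∈ st, p ∈ coins := by
  induction K with
  | zero =>
    intro st hst p hp
    simp only [Function.iterate_zero, id_eq, List.mem_singleton] at hst
    subst hst
    exact hp
  | succ K ih =>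
    intro st hst p hp
    rw [Function.iterate_succ_apply'] at hst
    rcases pv_outer_sound _ (PySem.Set.empty, []) st hst with hst' | ⟨c, hc, ij, hij, rfl⟩
    · simp at hst'
    · obtain ⟨hi, hj⟩ := pv_mem_pvPairs c.length ij hij
      exact ih c hc p (pv_mem_pvSwap c ij.1 ij.2 hi hj p hp)

-- ----- degenerate lists: levels die out -----
theorem pv_nextLevel_nil : pvNextLevel [] = [] := rfl

theorem pv_iter_nil (K : Nat) : pvNextLevel^[K] ([] : List (List String)) = [] := by
  induction K with
  | zero => rfl
  | succ K ih => rw [Function.iterate_succ_apply, pv_nextLevel_nil, ih]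

theorem pv_nextLevel_small (c : List String) (hc : c.length ≤ 1) : pvNextLevel [c] = [] := by
  have hp : pvPairs c.length = [] := by
    unfold pvPairs
    have h1 : c.length - 1 = 0 := by omega
    rw [h1]
    rfl
  unfold pvNextLevel pvLevelStep
  rw [List.foldl_cons, hp]
  rfl

-- ===== VERDICT (by name: the statement is the Claim_ definition above) =====
theorem change_position_spec : Claim_equal_change_position := by
  intro coins change hDom hPre
  unfold Spec_change_position
  obtain ⟨hch, hcase⟩ := hPre
  have hchK : change = (change.toNat : Int) := (Int.toNat_of_nonneg hch).symm
  -- A's BFS equals the running max over the level `change` reached by iteration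
  have hA : change_position coins change =
      (pvNextLevel^[change.toNat] [coins]).foldl pvStep 0 := by
    unfold change_position
    have hfuelbound : pvT change.toNat [coins] ≤
        (coins.length * coins.length + 1) ^ change.toNat := by
      have := pv_pvT_bound coins.length change.toNat [coins]
        (by intro c hc; rw [List.mem_singleton] at hc; subst hc; rfl)
      simpa using this
    have hsplit : (coins.length * coins.length + 1) ^ change.toNat =
        ((coins.length * coins.length + 1) ^ change.toNat - pvT change.toNat [coins]) +
          pvT change.toNat [coins] := by omega
    rw [hsplit]
    have hq : [(coins, change)] = [coins].map (fun st => (st, (change.toNat : Int))) := by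
      simp [← hchK]
    rw [hq]
    exact pv_top change.toNat [coins] PySem.Set.empty _ 0
      (by intro v t h; simp [PySem.Set.empty] at h)
  -- every collected value is nonnegative (or there are none at all)
  have hnn : ∀ v ∈ (pvNextLevel^[change.toNat] [coins]).filterMap pvVal, 0 ≤ v := by
    intro v hv
    rw [List.mem_filterMap] at hv
    obtain ⟨st, hst, hval⟩ := hv
    rcases hcase with ⟨hpos, hsmall⟩ | ⟨hdig, hne⟩
    · obtain ⟨r, hr⟩ : ∃ r, change.toNat = r + 1 := ⟨change.toNat - 1, by omega⟩
      rw [hr, Function.iterate_succ_apply, pv_nextLevel_small coins hsmall, pv_iter_nil] at hst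
      exact absurd hst (List.not_mem_nil)
    · refine pv_val_nonneg st ?_ v hval
      intro p hp
      rw [List.all_eq_true] at hdig
      exact hdig p (pv_iter_pieces coins change.toNat st hst p hp)
  by_cases h0 : change = 0
  · -- change == 0: A pops the single state, B parses it directly
    subst h0
    rw [hA]
    unfold change_position_alt
    rw [if_pos rfl]
    show pvStep 0 coins = (pvVal coins).getD 0
    cases hval : pvVal coins with
    | none => simp [pvStep, hval]
    | some v =>
      have h0v : 0 ≤ v := hnn v (by
        rw [List.mem_filterMap]
        exact ⟨coins, by simp, hval⟩)
      simp [pvStep, hval]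
      omega
  · rw [hA, pv_alt_eq coins change h0 hch, pv_foldl_pvStep, pv_final_max _ hnn]
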